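-- pv_equiv track=rewrite | github.com/TomCohenDev/eldritch-endless | scripts/scrape_eldritch.py | categorize_page
-- ===== SOURCE A (Python) =====
-- def categorize_page(categories: list[str], title: str) -> str:
--     """Determine the category for a page based on its wiki categories."""
--     lower_cats = [c.lower() for c in categories]
--
--     # Check in order of specificity
--     if any("investigator" in c for c in lower_cats):
--         return "investigators"
--     if any("ancient one" in c for c in lower_cats):
--         return "ancientOnes"
--     if any("epic monster" in c for c in lower_cats):
--         return "epicMonsters"
--     if any("monster" in c for c in lower_cats):
--         return "monsters"
--     if any("unique asset" in c for c in lower_cats):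
--         return "uniqueAssets"
--     if any("artifact" in c for c in lower_cats):
--         return "artifacts"
--     if any("spell" in c for c in lower_cats):
--         return "spells"
--     if any("condition" in c for c in lower_cats):
--         return "conditions"
--     if any("asset" in c for c in lower_cats):
--         return "assets"
--     if any("myster" in c for c in lower_cats):
--         return "mysteries"
--     if any("prelude" in c for c in lower_cats):
--         return "preludes"
--     if any("adventure" in c for c in lower_cats):
--         return "adventures"
--     if any("personal stor" in c for c in lower_cats):
--         return "personalStories"
--     if any("mythos" in c for c in lower_cats):
--         return "mythos"
--
--     # Encounter types
--     if any("general encounter" in c for c in lower_cats):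
--         return "encounters.general"
--     if any("location encounter" in c for c in lower_cats):
--         return "encounters.location"
--     if any("research encounter" in c for c in lower_cats):
--         return "encounters.research"
--     if any("other world" in c for c in lower_cats):
--         return "encounters.otherWorld"
--     if any("expedition" in c for c in lower_cats):
--         return "encounters.expedition"
--     if any("mystic ruins" in c for c in lower_cats):
--         return "encounters.mysticRuins"
--     if any("dream-quest" in c or "dreamquest" in c for c in lower_cats):
--         return "encounters.dreamQuest"
--     if any("devastation" in c for c in lower_cats):
--         return "encounters.devastation"
--     if any("special encounter" in c for c in lower_cats):
--         return "encounters.special"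
--     if any("combat" in c for c in lower_cats):
--         return "encounters.combat"
--     if any("encounter" in c for c in lower_cats):
--         return "encounters.other"
--
--     # Game components
--     if any("expansion" in c or "game set" in c for c in lower_cats):
--         return "gameSets"
--     if any("board" in c or "location" in c or "space" in c for c in lower_cats):
--         return "gameBoards"
--     if any("mechanic" in c or "rule" in c or "action" in c or "phase" in c for c in lower_cats):
--         return "mechanics"
--
--     return "other"
-- ===== SOURCE B (Python) =====
-- _RULES = [
--     (("investigator",), "investigators"),
--     (("ancient one",), "ancientOnes"),
--     (("epic monster",), "epicMonsters"),
--     (("monster",), "monsters"),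
--     (("unique asset",), "uniqueAssets"),
--     (("artifact",), "artifacts"),
--     (("spell",), "spells"),
--     (("condition",), "conditions"),
--     (("asset",), "assets"),
--     (("myster",), "mysteries"),
--     (("prelude",), "preludes"),
--     (("adventure",), "adventures"),
--     (("personal stor",), "personalStories"),
--     (("mythos",), "mythos"),
--     (("general encounter",), "encounters.general"),
--     (("location encounter",), "encounters.location"),
--     (("research encounter",), "encounters.research"),
--     (("other world",), "encounters.otherWorld"),
--     (("expedition",), "encounters.expedition"),
--     (("mystic ruins",), "encounters.mysticRuins"),
--     (("dream-quest", "dreamquest"), "encounters.dreamQuest"),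
--     (("devastation",), "encounters.devastation"),
--     (("special encounter",), "encounters.special"),
--     (("combat",), "encounters.combat"),
--     (("encounter",), "encounters.other"),
--     (("expansion", "game set"), "gameSets"),
--     (("board", "location", "space"), "gameBoards"),
--     (("mechanic", "rule", "action", "phase"), "mechanics"),
-- ]
--
--
-- def categorize_page(categories: list, title: str) -> str:
--     """Single pass over the categories, tracking the best (smallest)
--     priority-rule index matched so far."""
--     best = len(_RULES)
--     for c in categories:
--         cl = c.lower()
--         for i, (kws, _label) in enumerate(_RULES):
--             if any(k in cl for k in kws):
--                 best = min(best, i)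
--                 break
--     return _RULES[best][1] if best < len(_RULES) else "other"
-- ===== Notes on version B (the rewrite author's own statement) =====
-- stated objective: alternative
-- what changed: Replaced the 28-branch if-chain (each branch rescanning all categories) by a data-driven rule table and a single pass over the categories that tracks the minimum matching rule index.
import Mathlib
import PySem

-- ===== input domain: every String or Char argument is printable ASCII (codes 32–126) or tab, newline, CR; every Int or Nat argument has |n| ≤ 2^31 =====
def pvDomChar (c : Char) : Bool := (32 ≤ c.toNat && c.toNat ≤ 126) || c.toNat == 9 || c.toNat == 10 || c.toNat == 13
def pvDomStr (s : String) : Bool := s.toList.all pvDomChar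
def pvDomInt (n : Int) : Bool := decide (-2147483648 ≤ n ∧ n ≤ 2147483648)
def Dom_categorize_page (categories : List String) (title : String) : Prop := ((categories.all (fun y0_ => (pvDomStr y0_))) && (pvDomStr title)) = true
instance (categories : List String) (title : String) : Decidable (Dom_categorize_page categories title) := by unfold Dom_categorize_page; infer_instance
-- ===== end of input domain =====

-- B replaces A's 28-branch if-chain (each branch rescanning the categories) by a rule
-- table and one pass over the categories tracking the minimum matching rule index
-- (objective: alternative decomposition; same result proved for all inputs).

-- ===== PORT A =====
def categorize_page (categories : List String) (title : String) : String :=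
  let lower_cats := categories.map PySem.Str.lower
  if lower_cats.any (fun c => PySem.Str.isIn "investigator" c) then "investigators"
  else if lower_cats.any (fun c => PySem.Str.isIn "ancient one" c) then "ancientOnes"
  else if lower_cats.any (fun c => PySem.Str.isIn "epic monster" c) then "epicMonsters"
  else if lower_cats.any (fun c => PySem.Str.isIn "monster" c) then "monsters"
  else if lower_cats.any (fun c => PySem.Str.isIn "unique asset" c) then "uniqueAssets"
  else if lower_cats.any (fun c => PySem.Str.isIn "artifact" c) then "artifacts"
  else if lower_cats.any (fun c => PySem.Str.isIn "spell" c) then "spells"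
  else if lower_cats.any (fun c => PySem.Str.isIn "condition" c) then "conditions"
  else if lower_cats.any (fun c => PySem.Str.isIn "asset" c) then "assets"
  else if lower_cats.any (fun c => PySem.Str.isIn "myster" c) then "mysteries"
  else if lower_cats.any (fun c => PySem.Str.isIn "prelude" c) then "preludes"
  else if lower_cats.any (fun c => PySem.Str.isIn "adventure" c) then "adventures"
  else if lower_cats.any (fun c => PySem.Str.isIn "personal stor" c) then "personalStories"
  else if lower_cats.any (fun c => PySem.Str.isIn "mythos" c) then "mythos"
  else if lower_cats.any (fun c => PySem.Str.isIn "general encounter" c) then "encounters.general"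
  else if lower_cats.any (fun c => PySem.Str.isIn "location encounter" c) then "encounters.location"
  else if lower_cats.any (fun c => PySem.Str.isIn "research encounter" c) then "encounters.research"
  else if lower_cats.any (fun c => PySem.Str.isIn "other world" c) then "encounters.otherWorld"
  else if lower_cats.any (fun c => PySem.Str.isIn "expedition" c) then "encounters.expedition"
  else if lower_cats.any (fun c => PySem.Str.isIn "mystic ruins" c) then "encounters.mysticRuins"
  else if lower_cats.any (fun c => PySem.Str.isIn "dream-quest" c || PySem.Str.isIn "dreamquest" c) then "encounters.dreamQuest"
  else if lower_cats.any (fun c => PySem.Str.isIn "devastation" c) then "encounters.devastation"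
  else if lower_cats.any (fun c => PySem.Str.isIn "special encounter" c) then "encounters.special"
  else if lower_cats.any (fun c => PySem.Str.isIn "combat" c) then "encounters.combat"
  else if lower_cats.any (fun c => PySem.Str.isIn "encounter" c) then "encounters.other"
  else if lower_cats.any (fun c => PySem.Str.isIn "expansion" c || PySem.Str.isIn "game set" c) then "gameSets"
  else if lower_cats.any (fun c => PySem.Str.isIn "board" c || PySem.Str.isIn "location" c || PySem.Str.isIn "space" c) then "gameBoards"
  else if lower_cats.any (fun c => PySem.Str.isIn "mechanic" c || PySem.Str.isIn "rule" c || PySem.Str.isIn "action" c || PySem.Str.isIn "phase" c) then "mechanics"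
  else "other"

-- ===== PORT B =====
-- the rule table of Source B, in the same priority order
def pvRules : List (List String × String) :=
  [ (["investigator"], "investigators"),
    (["ancient one"], "ancientOnes"),
    (["epic monster"], "epicMonsters"),
    (["monster"], "monsters"),
    (["unique asset"], "uniqueAssets"),
    (["artifact"], "artifacts"),
    (["spell"], "spells"),
    (["condition"], "conditions"),
    (["asset"], "assets"),
    (["myster"], "mysteries"),
    (["prelude"], "preludes"),
    (["adventure"], "adventures"),
    (["personal stor"], "personalStories"),
    (["mythos"], "mythos"),
    (["general encounter"], "encounters.general"),
    (["location encounter"], "encounters.location"),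
    (["research encounter"], "encounters.research"),
    (["other world"], "encounters.otherWorld"),
    (["expedition"], "encounters.expedition"),
    (["mystic ruins"], "encounters.mysticRuins"),
    (["dream-quest", "dreamquest"], "encounters.dreamQuest"),
    (["devastation"], "encounters.devastation"),
    (["special encounter"], "encounters.special"),
    (["combat"], "encounters.combat"),
    (["encounter"], "encounters.other"),
    (["expansion", "game set"], "gameSets"),
    (["board", "location", "space"], "gameBoards"),
    (["mechanic", "rule", "action", "phase"], "mechanics") ]

def categorize_page_alt (categories : List String) (title : String) : String :=
  -- inner loop of Source B (break at the first matching rule) = findIdx over the table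
  let best := categories.foldl
    (fun best c =>
      let cl := PySem.Str.lower c
      min best (pvRules.findIdx (fun r => r.1.any (fun k => PySem.Str.isIn k cl))))
    pvRules.length
  if h : best < pvRules.length then (pvRules.get ⟨best, h⟩).2 else "other"

-- ===== PRECONDITION & SPEC =====
def Spec_categorize_page (categories : List String) (title : String) (out : String) : Prop := out = categorize_page_alt categories title
instance (categories : List String) (title : String) (out : String) : Decidable (Spec_categorize_page categories title out) := by unfold Spec_categorize_page; infer_instance

-- ===== CLAIM (what is proved, stated in full; the proofs are below) =====
def Claim_equal_categorize_page : Prop := ∀ (categories : List String) (title : String), Dom_categorize_page categories title → Spec_categorize_page categories title (categorize_page categories title)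

-- ===== LEMMAS AND PROOFS =====

-- A's if-chain, generalized over any rule table
def pvChain (rs : List (List String × String)) (cs : List String) : String :=
  match rs with
  | [] => "other"
  | (kws, lab) :: rs =>
      if cs.any (fun c => kws.any (fun k => PySem.Str.isIn k c)) then lab else pvChain rs cs

theorem pvA_eq_chain (categories : List String) (title : String) :
    categorize_page categories title = pvChain pvRules (categories.map PySem.Str.lower) := by
  simp [categorize_page, pvChain, pvRules, List.any_cons, List.any_nil, Bool.or_assoc]

theorem pvFindIdx_false {α : Type} (l : List α) :
    l.findIdx (fun _ => false) = l.length := by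
  induction l with
  | nil => simp
  | cons a l ih => simp [List.findIdx_cons, ih]

theorem pvChain_eq_findIdx (cs : List String) (rs : List (List String × String)) :
    pvChain rs cs =
      (if h : rs.findIdx (fun r => cs.any (fun c => r.1.any (fun k => PySem.Str.isIn k c))) < rs.length
       then (rs.get ⟨rs.findIdx (fun r => cs.any (fun c => r.1.any (fun k => PySem.Str.isIn k c))), h⟩).2
       else "other") := by
  induction rs with
  | nil => simp [pvChain]
  | cons r rs ih =>
    obtain ⟨kws, lab⟩ := r
    cases hb : cs.any (fun c => kws.any (fun k => PySem.Str.isIn k c)) with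
    | true =>
      simp only [pvChain, hb, if_true, List.findIdx_cons, cond_true]
      rw [dif_pos (by simp)]
      rfl
    | false =>
      simp only [pvChain, hb, Bool.false_eq_true, if_false, List.findIdx_cons, cond_false, ih]
      by_cases hlt : rs.findIdx (fun r => cs.any (fun c => r.1.any (fun k => PySem.Str.isIn k c))) < rs.length
      · rw [dif_pos hlt, dif_pos (by simpa using Nat.succ_lt_succ hlt)]
        simp
      · rw [dif_neg hlt, dif_neg (by simp only [List.length_cons, Nat.add_lt_add_iff_right]; exact hlt)]

theorem pvFindIdx_or {α : Type} (p q : α → Bool) (rs : List α) :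
    rs.findIdx (fun r => p r || q r) = min (rs.findIdx p) (rs.findIdx q) := by
  induction rs with
  | nil => simp only [List.findIdx_nil, Nat.min_self]
  | cons r rs ih =>
    simp only [List.findIdx_cons]
    cases hp : p r <;> cases hq : q r <;>
      simp only [hp, hq, Bool.true_or, Bool.false_or, Bool.or_self, cond_true, cond_false, ih] <;>
      omega

theorem pvFoldl_min_findIdx {α β : Type} (rs : List α) (g : β → α → Bool)
    (cs : List β) : ∀ (a : Nat), a ≤ rs.length →
    cs.foldl (fun b c => min b (rs.findIdx (g c))) a
      = min a (rs.findIdx (fun r => cs.any (fun c => g c r))) := by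
  induction cs with
  | nil =>
    intro a ha
    simp only [List.foldl_nil, List.any_nil, pvFindIdx_false]
    omega
  | cons c cs ih =>
    intro a ha
    have h1 : min a (rs.findIdx (g c)) ≤ rs.length := le_trans (min_le_left _ _) ha
    have h2 : rs.findIdx (fun r => g c r || cs.any (fun c' => g c' r))
        = min (rs.findIdx (g c)) (rs.findIdx (fun r => cs.any (fun c' => g c' r))) :=
      pvFindIdx_or _ _ rs
    simp only [List.foldl_cons, List.any_cons]
    rw [ih _ h1, h2, min_assoc]

-- ===== VERDICT (by name: the statement is the Claim_ definition above) =====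
theorem categorize_page_spec : Claim_equal_categorize_page := by
  intro categories title _
  unfold Spec_categorize_page categorize_page_alt
  rw [pvA_eq_chain, pvChain_eq_findIdx]
  have hfold := pvFoldl_min_findIdx pvRules
      (fun c r => r.1.any (fun k => PySem.Str.isIn k (PySem.Str.lower c)))
      categories pvRules.length (le_refl _)
  have hle : pvRules.findIdx
      (fun r => categories.any (fun c => r.1.any (fun k => PySem.Str.isIn k (PySem.Str.lower c))))
      ≤ pvRules.length := List.findIdx_le_length
  simp only [List.any_map, Function.comp_def]
  beta_reduce at hfold
  rw [hfold, min_eq_right hle]
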